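-- pv_equiv track=rewrite | github.com/CCSB-DFCI/TF_isoforms_paper | src/data_loading/isolib.py | _coords_transform_aa_seq_to_alignment
-- ===== SOURCE A (Python) =====
-- def _coords_transform_aa_seq_to_alignment(i, alignment):
--     if i > len(alignment.replace("I", "")):
--         raise ValueError("position is not in isoform AA sequence")
--     aa_seq_indices = [
--         "" if c == "I" else len(alignment[:j].replace("I", ""))
--         for j, c in enumerate(alignment)
--     ]
--     return aa_seq_indices.index(i)
-- ===== SOURCE B (Python) =====
-- def _coords_transform_aa_seq_to_alignment(i, alignment):
--     # Single left-to-right pass with a running count of non-"I" columns: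
--     # the alignment column whose preceding non-"I" count equals i is the answer.
--     cnt = 0
--     for j, c in enumerate(alignment):
--         if c != "I":
--             if cnt == i:
--                 return j
--             cnt += 1
--     raise ValueError("position is not in isoform AA sequence")
-- ===== Notes on version B (the rewrite author's own statement) =====
-- stated objective: faster
-- what changed: Replaces building a per-column list of prefix-slice replace() counts plus list.index with a single pass keeping a running non-'I' count and returning the first column where it equals i.
import Mathlib
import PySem

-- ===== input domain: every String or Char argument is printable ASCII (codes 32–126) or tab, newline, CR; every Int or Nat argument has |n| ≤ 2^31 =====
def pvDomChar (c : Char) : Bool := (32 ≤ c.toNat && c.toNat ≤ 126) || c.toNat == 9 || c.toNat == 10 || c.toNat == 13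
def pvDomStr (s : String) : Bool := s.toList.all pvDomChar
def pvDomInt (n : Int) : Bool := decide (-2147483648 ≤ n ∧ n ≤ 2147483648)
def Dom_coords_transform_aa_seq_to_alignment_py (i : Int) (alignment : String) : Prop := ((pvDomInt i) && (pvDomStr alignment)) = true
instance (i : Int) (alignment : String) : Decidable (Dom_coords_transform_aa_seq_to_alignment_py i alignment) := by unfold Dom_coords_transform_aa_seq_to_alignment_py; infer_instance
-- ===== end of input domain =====

-- B replaces A's quadratic per-column prefix-count list + list.index with one linear pass
-- keeping a running non-'I' count (objective: faster; same ValueError cases, excluded by Pre_).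

-- ===== PORT A =====
-- aa_seq_indices holds "" for 'I' columns and an int otherwise; since i is an int it can
-- never equal "", so the list is ported as List (Option Int) with none for "".
def coords_transform_aa_seq_to_alignment_py (i : Int) (alignment : String) : Int :=
  if i > ((PySem.Chars.replace alignment.toList ['I'] []).length : Int) then
    0  -- raise ValueError (excluded by Pre_)
  else
    let aa_seq_indices : List (Option Int) :=
      (PySem.List.enumerate alignment.toList).map (fun jc =>
        if jc.2 = 'I' then none
        else some ((PySem.Chars.replace (PySem.List.slice alignment.toList none (some jc.1)) ['I'] []).length : Int))
    match PySem.List.index? aa_seq_indices (some i) with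
    | some k => (k : Int)
    | none => 0  -- list.index raises ValueError (excluded by Pre_)

-- ===== PORT B =====
def pvAltGo (i cnt j : Int) : List Char → Int
  | [] => 0  -- raise ValueError (excluded by Pre_)
  | c :: rest =>
    if c ≠ 'I' then
      if cnt = i then j else pvAltGo i (cnt + 1) (j + 1) rest
    else
      pvAltGo i cnt (j + 1) rest

def coords_transform_aa_seq_to_alignment_py_alt (i : Int) (alignment : String) : Int :=
  pvAltGo i 0 0 alignment.toList

-- ===== PRECONDITION & SPEC =====
-- Pre_: exactly the inputs where Python A returns normally: 0 <= i < number of non-'I'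
-- characters of the alignment (otherwise A raises ValueError, from the guard or from .index).
def Pre_coords_transform_aa_seq_to_alignment_py (i : Int) (alignment : String) : Prop :=
  0 ≤ i ∧ i < ((alignment.toList.filter (fun c => c ≠ 'I')).length : Int)
instance (i : Int) (alignment : String) : Decidable (Pre_coords_transform_aa_seq_to_alignment_py i alignment) := by unfold Pre_coords_transform_aa_seq_to_alignment_py; infer_instance

def pvWitness_coords_transform_aa_seq_to_alignment_py : Int × String := (1, "AIB")

def Spec_coords_transform_aa_seq_to_alignment_py (i : Int) (alignment : String) (out : Int) : Prop := out = coords_transform_aa_seq_to_alignment_py_alt i alignment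
instance (i : Int) (alignment : String) (out : Int) : Decidable (Spec_coords_transform_aa_seq_to_alignment_py i alignment out) := by unfold Spec_coords_transform_aa_seq_to_alignment_py; infer_instance

-- ===== CLAIM (what is proved, stated in full; the proofs are below) =====
def Claim_equal_coords_transform_aa_seq_to_alignment_py : Prop := ∀ (i : Int) (alignment : String), Dom_coords_transform_aa_seq_to_alignment_py i alignment → Pre_coords_transform_aa_seq_to_alignment_py i alignment → Spec_coords_transform_aa_seq_to_alignment_py i alignment (coords_transform_aa_seq_to_alignment_py i alignment)

-- ===== LEMMAS AND PROOFS =====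

-- Python's s.replace("I", "") is the filter dropping 'I' (single-character pattern).
theorem pvReplGo_filter (fuel : Nat) : ∀ (l acc : List Char), l.length ≤ fuel →
    PySem.Chars.replace.go ['I'] [] fuel l acc = acc.reverse ++ l.filter (fun c => c ≠ 'I') := by
  induction fuel with
  | zero => intro l acc h; simp at h; simp [h, PySem.Chars.replace.go]
  | succ n ih =>
    intro l acc h
    cases l with
    | nil => simp [PySem.Chars.replace.go]
    | cons c t =>
      rw [PySem.Chars.replace.go.eq_def]
      simp only [List.isPrefixOf, List.length_cons] at *
      by_cases hc : c = 'I'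
      · simp [hc, ih t acc (by omega)]
      · simp [hc, Ne.symm hc, ih t (c :: acc) (by omega)]

theorem pvRepl_filter (s : List Char) :
    PySem.Chars.replace s ['I'] [] = s.filter (fun c => c ≠ 'I') := by
  rw [PySem.Chars.replace]
  simp [pvReplGo_filter s.length s [] (le_refl _)]

-- the value list A builds, expressed structurally with a running count
def pvBuild : List Char → Int → List (Option Int)
  | [], _ => []
  | c :: t, n => (if c = 'I' then none else some n) :: pvBuild t (if c = 'I' then n else n + 1)

theorem pvAa_eq_build : ∀ (t pre : List Char),
    (PySem.List.enumerate t (pre.length : Int)).map (fun jc =>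
        if jc.2 = 'I' then none
        else some ((((PySem.List.slice (pre ++ t) none (some jc.1)).filter (fun c => c ≠ 'I')).length : Int)))
      = pvBuild t ((pre.filter (fun c => c ≠ 'I')).length : Int) := by
  intro t
  induction t with
  | nil => intro pre; simp [PySem.List.enumerate, pvBuild]
  | cons c t ih =>
    intro pre
    rw [PySem.List.enumerate_cons, List.map_cons]
    have h1 : PySem.List.slice (pre ++ c :: t) none (some (pre.length : Int)) = pre := by
      rw [PySem.List.slice_to_natCast]; exact List.take_left
    have h2 : ((pre.length : Int) + 1) = (((pre ++ [c]).length : Nat) : Int) := by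
      simp
    have h3 : pre ++ c :: t = (pre ++ [c]) ++ t := by simp
    rw [h2, h3, ih (pre ++ [c])]
    by_cases hc : c = 'I'
    · simp [pvBuild, hc, List.filter_append]
    · simp [pvBuild, hc, List.filter_append]

theorem pvAltGo_eq_index (i : Int) : ∀ (t : List Char) (c j : Int),
    pvAltGo i c j t = (match PySem.List.index? (pvBuild t c) (some i) with
      | some k => j + (k : Int)
      | none => 0) := by
  intro t
  induction t with
  | nil => intro c j; simp [pvAltGo, pvBuild, PySem.List.index?]
  | cons ch t ih =>
    intro c j
    by_cases hI : ch = 'I'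
    · have hne : (none : Option Int) ≠ some i := by simp
      rw [show pvBuild (ch :: t) c = none :: pvBuild t c by simp [pvBuild, hI]]
      rw [PySem.List.index?_cons_of_ne _ hne]
      simp only [pvAltGo, hI, if_neg (by simp : ¬('I' ≠ 'I'))]
      rw [ih c (j + 1)]
      cases h : PySem.List.index? (pvBuild t c) (some i) <;> simp [PySem.List.index?] at h <;> simp [h] <;> ring
    · rw [show pvBuild (ch :: t) c = some c :: pvBuild t (c + 1) by simp [pvBuild, hI]]
      by_cases hci : c = i
      · rw [hci, PySem.List.index?_cons_self]
        simp [pvAltGo, hI]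
      · have hne : (some c : Option Int) ≠ some i := by simp [hci]
        rw [PySem.List.index?_cons_of_ne _ hne]
        simp only [pvAltGo, if_pos (by simp [hI] : (ch ≠ 'I'))]
        rw [if_neg hci, ih (c + 1) (j + 1)]
        cases h : PySem.List.index? (pvBuild t (c + 1)) (some i) <;> simp [PySem.List.index?] at h <;> simp [h] <;> ring

-- ===== VERDICT (by name: the statement is the Claim_ definition above) =====
theorem coords_transform_aa_seq_to_alignment_py_spec : Claim_equal_coords_transform_aa_seq_to_alignment_py := by
  intro i alignment _dom hpre
  unfold Spec_coords_transform_aa_seq_to_alignment_py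
  obtain ⟨h0, hlt⟩ := hpre
  unfold coords_transform_aa_seq_to_alignment_py coords_transform_aa_seq_to_alignment_py_alt
  have haa : (PySem.List.enumerate alignment.toList).map (fun jc =>
        if jc.2 = 'I' then none
        else some ((PySem.Chars.replace (PySem.List.slice alignment.toList none (some jc.1)) ['I'] []).length : Int))
      = pvBuild alignment.toList 0 := by
    have := pvAa_eq_build alignment.toList []
    simp only [List.length_nil, Nat.cast_zero, List.nil_append, List.filter_nil] at this
    rw [← this]
    simp only [pvRepl_filter]
  rw [pvRepl_filter, haa, pvAltGo_eq_index i alignment.toList 0 0]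
  rw [if_neg (by omega)]
  cases h : List.idxOf? (some i) (pvBuild alignment.toList 0) with
  | none => simp [PySem.List.index?, h]
  | some k => simp [PySem.List.index?, h]
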